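-- pv_equiv track=rewrite | github.com/florianow/hubert | scripts/extract_conjugations.py | match_sentences_to_forms
-- ===== SOURCE A (Python) =====
-- def match_sentences_to_forms(verb_rank, conjugation_forms, yaml_sentences):
--     """Find example sentences where the highlighted word matches a conjugation form.
--
--     Returns dict of matches: {tense_code: {person_index: {fr, de, blank}}}
--     Only returns exact matches — no fuzzy matching, no generation.
--     """
--     matches = {}
--     sents = yaml_sentences.get(verb_rank, [])
--     if not sents:
--         return matches
--
--     # Build a lookup: form -> [(tense_code, person_index), ...]
--     form_lookup = {}
--     for tense_code, forms in conjugation_forms.items():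
--         for person_idx, form in enumerate(forms):
--             if form:
--                 key = form.lower()
--                 form_lookup.setdefault(key, []).append((tense_code, person_idx))
--
--     for fr_sent, de_sent, highlighted in sents:
--         key = highlighted.lower().strip()
--         if key in form_lookup:
--             for tense_code, person_idx in form_lookup[key]:
--                 if tense_code not in matches:
--                     matches[tense_code] = {}
--                 if person_idx not in matches[tense_code]:
--                     matches[tense_code][person_idx] = {
--                         'fr': fr_sent,
--                         'de': de_sent,
--                         'blank': highlighted
--                     }
--
--     return matches
-- ===== SOURCE B (Python) =====
-- def match_sentences_to_forms(verb_rank, conjugation_forms, yaml_sentences):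
--     """Index the sentences instead of the forms: keep the first sentence per
--     highlighted key, then walk the conjugation table once per distinct key."""
--     sent_lookup = {}
--     for fr_sent, de_sent, highlighted in yaml_sentences.get(verb_rank, []):
--         sent_lookup.setdefault(highlighted.lower().strip(), (fr_sent, de_sent, highlighted))
--     matches = {}
--     for key, (fr_sent, de_sent, highlighted) in sent_lookup.items():
--         for tense_code, forms in conjugation_forms.items():
--             for person_idx, form in enumerate(forms):
--                 if form and form.lower() == key:
--                     matches.setdefault(tense_code, {})[person_idx] = {
--                         'fr': fr_sent, 'de': de_sent, 'blank': highlighted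
--                     }
--     return matches
-- ===== Notes on version B (the rewrite author's own statement) =====
-- stated objective: alternative
-- what changed: B inverts which collection is indexed: instead of building a form->(tense,person) index and scanning all sentences with presence guards, B dedups the sentences into a first-sentence-per-key dict and walks the conjugation table once per distinct key with unconditional inserts.
import Mathlib
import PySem

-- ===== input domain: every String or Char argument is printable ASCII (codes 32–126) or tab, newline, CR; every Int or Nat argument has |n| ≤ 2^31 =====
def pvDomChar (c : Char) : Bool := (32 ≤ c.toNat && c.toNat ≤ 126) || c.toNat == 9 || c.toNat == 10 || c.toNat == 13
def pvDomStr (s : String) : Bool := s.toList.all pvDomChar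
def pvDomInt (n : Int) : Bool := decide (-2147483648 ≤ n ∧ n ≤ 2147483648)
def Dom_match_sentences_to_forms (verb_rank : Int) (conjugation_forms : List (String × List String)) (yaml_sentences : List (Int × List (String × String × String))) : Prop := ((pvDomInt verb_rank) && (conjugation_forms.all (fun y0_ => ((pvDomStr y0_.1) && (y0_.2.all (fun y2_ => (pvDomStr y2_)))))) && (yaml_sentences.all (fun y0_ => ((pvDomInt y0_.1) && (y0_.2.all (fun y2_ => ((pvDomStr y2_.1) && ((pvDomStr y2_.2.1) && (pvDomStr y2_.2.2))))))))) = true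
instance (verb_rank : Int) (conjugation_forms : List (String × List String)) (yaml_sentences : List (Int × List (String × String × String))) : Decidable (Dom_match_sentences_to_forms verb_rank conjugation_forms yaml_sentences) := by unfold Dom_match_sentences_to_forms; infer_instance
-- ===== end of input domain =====

-- B inverts which collection is indexed: instead of A's form→(tense,person) index scanned per
-- sentence with presence guards, B dedups the sentences into a first-sentence-per-key dict and
-- walks the conjugation table once per distinct key (objective: alternative; same results, same order).

-- ===== PORT A =====
-- the {'fr': …, 'de': …, 'blank': …} dict literal
def pvEntry (fr de hl : String) : List (String × String) := [("fr", fr), ("de", de), ("blank", hl)]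

-- 'if person_idx not in matches[tense_code]: matches[tense_code][person_idx] = {...}'
def pvInsPerson (m1 : PySem.Dict String (PySem.Dict Int (List (String × String)))) (tc : String) (pi : Int) (fr de hl : String) : PySem.Dict String (PySem.Dict Int (List (String × String))) :=
  if (m1.getD tc PySem.Dict.empty).contains pi then m1
  else m1.insert tc ((m1.getD tc PySem.Dict.empty).insert pi (pvEntry fr de hl))

-- A's insertion: 'if tense_code not in matches: matches[tense_code] = {}' then the person insert
def pvInsA (m : PySem.Dict String (PySem.Dict Int (List (String × String)))) (tc : String) (pi : Int) (fr de hl : String) : PySem.Dict String (PySem.Dict Int (List (String × String))) :=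
  pvInsPerson (if m.contains tc then m else m.insert tc PySem.Dict.empty) tc pi fr de hl

def match_sentences_to_forms (verb_rank : Int) (conjugation_forms : List (String × List String)) (yaml_sentences : List (Int × List (String × String × String))) : List (String × List (Int × List (String × String))) :=
  let sents := (PySem.Dict.ofList yaml_sentences).getD verb_rank []
  if sents.isEmpty then [] else
  let form_lookup := ((PySem.Dict.ofList conjugation_forms).items).foldl (fun d p =>
      (PySem.List.enumerate p.2).foldl (fun d q =>
        if q.2 ≠ "" then d.modify (PySem.Str.lower q.2) [] (· ++ [(p.1, q.1)]) else d) d)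
    PySem.Dict.empty
  let acc := sents.foldl (fun m s =>
      let key := PySem.Str.strip (PySem.Str.lower s.2.2)
      if form_lookup.contains key then
        (form_lookup.getD key []).foldl (fun m tp => pvInsA m tp.1 tp.2 s.1 s.2.1 s.2.2) m
      else m)
    PySem.Dict.empty
  acc.items.map (fun p => (p.1, p.2.items))

-- ===== PORT B =====
def match_sentences_to_forms_alt (verb_rank : Int) (conjugation_forms : List (String × List String)) (yaml_sentences : List (Int × List (String × String × String))) : List (String × List (Int × List (String × String))) :=
  -- 'sent_lookup.setdefault(highlighted.lower().strip(), (fr_sent, de_sent, highlighted))'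
  let sent_lookup := ((PySem.Dict.ofList yaml_sentences).getD verb_rank []).foldl
      (fun d s => d.setdefault (PySem.Str.strip (PySem.Str.lower s.2.2)) s) PySem.Dict.empty
  -- 'for key, (fr_sent, de_sent, highlighted) in sent_lookup.items(): …'
  let ms := sent_lookup.items.foldl (fun m kv =>
      ((PySem.Dict.ofList conjugation_forms).items).foldl (fun m p =>
        (PySem.List.enumerate p.2).foldl (fun m q =>
          if q.2 ≠ "" ∧ PySem.Str.lower q.2 = kv.1 then
            -- 'matches.setdefault(tense_code, {})[person_idx] = {…}'
            let m' := m.setdefault p.1 PySem.Dict.empty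
            m'.insert p.1 ((m'.getD p.1 PySem.Dict.empty).insert q.1
              [("fr", kv.2.1), ("de", kv.2.2.1), ("blank", kv.2.2.2)])
          else m) m) m)
    PySem.Dict.empty
  ms.items.map (fun p => (p.1, p.2.items))

-- ===== PRECONDITION & SPEC =====
def Spec_match_sentences_to_forms (verb_rank : Int) (conjugation_forms : List (String × List String)) (yaml_sentences : List (Int × List (String × String × String))) (out : List (String × List (Int × List (String × String)))) : Prop := out = match_sentences_to_forms_alt verb_rank conjugation_forms yaml_sentences
instance (verb_rank : Int) (conjugation_forms : List (String × List String)) (yaml_sentences : List (Int × List (String × String × String))) (out : List (String × List (Int × List (String × String)))) : Decidable (Spec_match_sentences_to_forms verb_rank conjugation_forms yaml_sentences out) := by unfold Spec_match_sentences_to_forms; infer_instance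

-- ===== CLAIM (what is proved, stated in full; the proofs are below) =====
def Claim_equal_match_sentences_to_forms : Prop := ∀ (verb_rank : Int) (conjugation_forms : List (String × List String)) (yaml_sentences : List (Int × List (String × String × String))), Dom_match_sentences_to_forms verb_rank conjugation_forms yaml_sentences → Spec_match_sentences_to_forms verb_rank conjugation_forms yaml_sentences (match_sentences_to_forms verb_rank conjugation_forms yaml_sentences)

-- ===== LEMMAS AND PROOFS =====

-- B's unconditional nested insert (the 'matches.setdefault(tc, {})[pi] = entry' step), over a whole sentence triple
def pvIns (m : PySem.Dict String (PySem.Dict Int (List (String × String)))) (tc : String) (pi : Int) (s : String × String × String) : PySem.Dict String (PySem.Dict Int (List (String × String))) :=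
  let m' := m.setdefault tc PySem.Dict.empty
  m'.insert tc ((m'.getD tc PySem.Dict.empty).insert pi [("fr", s.1), ("de", s.2.1), ("blank", s.2.2)])

def pvKeyOf (s : String × String × String) : String := PySem.Str.strip (PySem.Str.lower s.2.2)

-- the flat list of (lowered form, (tense, person)) triples, in conjugation-table order
def pvPairs (items : List (String × List String)) : List (String × String × Int) :=
  items.flatMap (fun p => ((PySem.List.enumerate p.2).filter (fun q => decide (q.2 ≠ ""))).map (fun q => (PySem.Str.lower q.2, p.1, q.1)))

-- the (tense, person) pairs whose lowered form is k, in conjugation-table order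
def pvFor (items : List (String × List String)) (k : String) : List (String × Int) :=
  ((pvPairs items).filter (fun r => r.1 == k)).map (·.2)

-- first sentence per key, in first-occurrence order, skipping keys already seen
def pvFirsts (seen : List String) : List (String × String × String) → List (String × (String × String × String))
  | [] => []
  | s :: r => if pvKeyOf s ∈ seen then pvFirsts seen r
              else (pvKeyOf s, s) :: pvFirsts (pvKeyOf s :: seen) r

theorem pv_foldl_congr {α δ : Type _} {f g : δ → α → δ} (l : List α) (d : δ) (h : ∀ d a, f d a = g d a) : l.foldl f d = l.foldl g d := by
  induction l generalizing d with
  | nil => rfl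
  | cons a l ih => simp only [List.foldl_cons, h, ih]

-- A's index build is a single modify-append fold over pvPairs
theorem pv_build_eq (items : List (String × List String)) (d : PySem.Dict String (List (String × Int))) :
    items.foldl (fun d p =>
      (PySem.List.enumerate p.2).foldl (fun d q =>
        if q.2 ≠ "" then d.modify (PySem.Str.lower q.2) [] (· ++ [(p.1, q.1)]) else d) d) d
    = (pvPairs items).foldl (fun d r => d.modify r.1 [] (· ++ [r.2])) d := by
  unfold pvPairs
  rw [List.foldl_flatMap]
  refine pv_foldl_congr _ _ (fun d p => ?_)
  rw [List.foldl_map, List.foldl_filter]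
  refine pv_foldl_congr _ _ (fun d q => ?_)
  by_cases h : q.2 = "" <;> simp [h]

-- what A's index returns at a key
theorem pv_lookup_eq (items : List (String × List String)) (k : String) :
    (((pvPairs items).foldl (fun d r => d.modify r.1 [] (· ++ [r.2])) PySem.Dict.empty).getD k [])
    = pvFor items k := by
  unfold pvFor
  rw [PySem.Dict.getD_foldl_modify_append]
  simp

-- A's per-sentence step is a guarded-insert fold over pvFor
theorem pvA_step (items : List (String × List String)) (k fr de hl : String)
    (m : PySem.Dict String (PySem.Dict Int (List (String × String)))) :
    (if (items.foldl (fun d p =>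
        (PySem.List.enumerate p.2).foldl (fun d q =>
          if q.2 ≠ "" then d.modify (PySem.Str.lower q.2) [] (· ++ [(p.1, q.1)]) else d) d) PySem.Dict.empty).contains k then
       ((items.foldl (fun d p =>
        (PySem.List.enumerate p.2).foldl (fun d q =>
          if q.2 ≠ "" then d.modify (PySem.Str.lower q.2) [] (· ++ [(p.1, q.1)]) else d) d) PySem.Dict.empty).getD k []).foldl (fun m tp => pvInsA m tp.1 tp.2 fr de hl) m
     else m)
    = (pvFor items k).foldl (fun m tp => pvInsA m tp.1 tp.2 fr de hl) m := by
  rw [pv_build_eq]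
  by_cases hc : ((pvPairs items).foldl (fun d r => d.modify r.1 [] (· ++ [r.2])) PySem.Dict.empty).contains k = true
  · rw [if_pos hc, pv_lookup_eq]
  · have h0 : pvFor items k = [] := by
      rw [← pv_lookup_eq]
      exact PySem.Dict.getD_of_not_contains _ [] (h := by simpa using hc)
    rw [if_neg hc, h0]
    rfl

-- B's per-key table scan is an unconditional-insert fold over pvFor
theorem pvB_step (items : List (String × List String)) (k : String) (v : String × String × String)
    (m : PySem.Dict String (PySem.Dict Int (List (String × String)))) :
    items.foldl (fun m p =>
      (PySem.List.enumerate p.2).foldl (fun m q =>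
        if q.2 ≠ "" ∧ PySem.Str.lower q.2 = k then pvIns m p.1 q.1 v else m) m) m
    = (pvFor items k).foldl (fun m tp => pvIns m tp.1 tp.2 v) m := by
  unfold pvFor pvPairs
  rw [List.foldl_map, List.foldl_filter, List.foldl_flatMap]
  refine pv_foldl_congr _ _ (fun m p => ?_)
  rw [List.foldl_map, List.foldl_filter]
  refine pv_foldl_congr _ _ (fun m q => ?_)
  by_cases h : q.2 = "" <;> by_cases h2 : PySem.Str.lower q.2 = k <;> simp [h, h2, pvIns]

-- presence after one unconditional insert
theorem contains_pvIns (m : PySem.Dict String (PySem.Dict Int (List (String × String)))) (tc : String) (pi : Int) (s : String × String × String) (tc' : String) (pi' : Int) :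
    (((pvIns m tc pi s).getD tc' PySem.Dict.empty).contains pi')
    = (decide (tc' = tc ∧ pi' = pi) || ((m.getD tc' PySem.Dict.empty).contains pi')) := by
  unfold pvIns
  by_cases h : tc' = tc
  · subst h
    rw [PySem.Dict.getD_insert, if_pos rfl, PySem.Dict.contains_insert, PySem.Dict.getD_setdefault_self]
    by_cases h2 : pi' = pi <;> simp [h2]
  · rw [PySem.Dict.getD_insert, if_neg h, PySem.Dict.getD_eq_get?_getD,
        PySem.Dict.get?_setdefault_of_ne _ _ h, ← PySem.Dict.getD_eq_get?_getD]
    simp [h]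

-- presence after a whole group of unconditional inserts
theorem contains_fold_pvIns (L : List (String × Int)) (s : String × String × String)
    (m : PySem.Dict String (PySem.Dict Int (List (String × String)))) (tc : String) (pi : Int) :
    (((L.foldl (fun m tp => pvIns m tp.1 tp.2 s) m).getD tc PySem.Dict.empty).contains pi)
    = (decide ((tc, pi) ∈ L) || ((m.getD tc PySem.Dict.empty).contains pi)) := by
  induction L generalizing m with
  | nil => simp
  | cons tp L ih =>
    rw [List.foldl_cons, ih, contains_pvIns]
    by_cases h1 : (tc, pi) ∈ L <;> by_cases h2 : tc = tp.1 ∧ pi = tp.2 <;>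
      simp [h1, h2, List.mem_cons, Prod.ext_iff]

-- A's guarded insert is B's unconditional insert when the pair is absent …
theorem pvInsA_absent (m : PySem.Dict String (PySem.Dict Int (List (String × String)))) (tc : String) (pi : Int) (s : String × String × String)
    (h : ((m.getD tc PySem.Dict.empty).contains pi) = false) :
    pvInsA m tc pi s.1 s.2.1 s.2.2 = pvIns m tc pi s := by
  unfold pvInsA pvInsPerson pvIns pvEntry
  by_cases hc : m.contains tc = true
  · rw [PySem.Dict.setdefault_of_contains (h := hc), if_pos hc, if_neg (by simp [h])]
  · have hnc : m.contains tc = false := by simpa using hc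
    rw [PySem.Dict.setdefault_of_not_contains (h := hnc), if_neg hc]
    simp
-- … and a no-op when the pair is present
theorem pvInsA_present (m : PySem.Dict String (PySem.Dict Int (List (String × String)))) (tc : String) (pi : Int) (fr de hl : String)
    (h : ((m.getD tc PySem.Dict.empty).contains pi) = true) :
    pvInsA m tc pi fr de hl = m := by
  unfold pvInsA pvInsPerson
  by_cases hc : m.contains tc = true
  · rw [if_pos hc, if_pos h]
  · exfalso
    rw [PySem.Dict.getD_of_not_contains _ _ (h := by simpa using hc)] at h
    simp at h

theorem pv_fold_present (L : List (String × Int)) (fr de hl : String)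
    (m : PySem.Dict String (PySem.Dict Int (List (String × String)))) :
    (∀ tp ∈ L, ((m.getD tp.1 PySem.Dict.empty).contains tp.2) = true) →
    L.foldl (fun m tp => pvInsA m tp.1 tp.2 fr de hl) m = m := by
  induction L with
  | nil => intro _; rfl
  | cons tp L ih =>
    intro h
    rw [List.foldl_cons, pvInsA_present _ _ _ _ _ _ (h tp (by simp))]
    exact ih (fun tp h' => h tp (by simp [h']))

-- on an absent, duplicate-free group the two insert folds agree
theorem pv_fold_absent (L : List (String × Int)) (s : String × String × String) :
    ∀ (m : PySem.Dict String (PySem.Dict Int (List (String × String)))), L.Nodup →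
    (∀ tp ∈ L, ((m.getD tp.1 PySem.Dict.empty).contains tp.2) = false) →
    L.foldl (fun m tp => pvInsA m tp.1 tp.2 s.1 s.2.1 s.2.2) m
    = L.foldl (fun m tp => pvIns m tp.1 tp.2 s) m := by
  induction L with
  | nil => intro m _ _; rfl
  | cons tp L ih =>
    intro m hnd h
    rw [List.foldl_cons, List.foldl_cons, pvInsA_absent _ _ _ _ (h tp (by simp))]
    refine ih _ hnd.of_cons (fun tp' h' => ?_)
    rw [contains_pvIns]
    have hne : ¬(tp'.1 = tp.1 ∧ tp'.2 = tp.2) := by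
      intro he
      exact (List.nodup_cons.mp hnd).1 (by
        have : tp' = tp := Prod.ext he.1 he.2
        simpa [this] using h')
    simp [hne, h tp' (by simp [h'])]

-- each (tense, person) pair occurs at most once in the table
theorem pvPairs_proj_nodup (items : List (String × List String)) (hk : (items.map (·.1)).Nodup) :
    ((pvPairs items).map (·.2)).Nodup := by
  unfold pvPairs
  rw [List.map_flatMap, List.nodup_flatMap]
  constructor
  · intro p _
    rw [List.map_map, List.Nodup, List.pairwise_map]
    refine (List.Pairwise.sublist List.filter_sublist (PySem.List.pairwise_lt_enumerate p.2 0)).imp ?_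
    intro a b hab he
    simp only [Function.comp, Prod.mk.injEq] at he
    omega
  · have hp : items.Pairwise (fun a b => a.1 ≠ b.1) := by
      rw [List.Nodup, List.pairwise_map] at hk
      exact hk
    refine hp.imp ?_
    intro a b hab x hxa hxb
    simp only [List.map_map, List.mem_map, List.mem_filter, Function.comp] at hxa hxb
    obtain ⟨qa, -, hqa⟩ := hxa
    obtain ⟨qb, -, hqb⟩ := hxb
    exact hab ((congrArg Prod.fst hqa).trans (congrArg Prod.fst hqb).symm)

theorem pvFor_nodup (items : List (String × List String)) (hk : (items.map (·.1)).Nodup) (k : String) :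
    (pvFor items k).Nodup := by
  unfold pvFor
  exact List.Nodup.sublist (List.Sublist.map _ List.filter_sublist) (pvPairs_proj_nodup items hk)

theorem pvFor_mem (items : List (String × List String)) (k : String) (tp : String × Int) :
    tp ∈ pvFor items k ↔ (k, tp) ∈ pvPairs items := by
  unfold pvFor
  simp only [List.mem_map, List.mem_filter, beq_iff_eq]
  constructor
  · rintro ⟨r, ⟨hr, hk⟩, he⟩
    have : r = (k, tp) := by
      obtain ⟨r1, r2⟩ := r
      simp only at hk he
      rw [hk, he]
    rwa [this] at hr
  · intro h
    exact ⟨(k, tp), ⟨h, rfl⟩, rfl⟩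

-- a (tense, person) pair determines its key
theorem pvPairs_key_unique (items : List (String × List String)) (hk : (items.map (·.1)).Nodup)
    {k k' : String} {tp : String × Int}
    (h1 : (k, tp) ∈ pvPairs items) (h2 : (k', tp) ∈ pvPairs items) : k = k' := by
  have := List.inj_on_of_nodup_map (pvPairs_proj_nodup items hk) (x := (k, tp)) (y := (k', tp))
  have he := this h1 h2 rfl
  exact congrArg (·.1) he

theorem pv_firsts_congr {s1 s2 : List String} (h : ∀ x, x ∈ s1 ↔ x ∈ s2) (l : List (String × String × String)) : pvFirsts s1 l = pvFirsts s2 l := by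
  induction l generalizing s1 s2 with
  | nil => rfl
  | cons s r ih =>
    rw [pvFirsts, pvFirsts]
    by_cases hm : pvKeyOf s ∈ s1
    · rw [if_pos hm, if_pos ((h _).mp hm), ih h]
    · rw [if_neg hm, if_neg (fun hm2 => hm ((h _).mpr hm2))]
      congr 1
      exact ih (fun x => by simp [h x])

-- the deduplicating sentence-index fold produces exactly pvFirsts
theorem pv_sentLookup_items (l : List (String × String × String))
    (d : PySem.Dict String (String × String × String)) (hd : d.keys.Nodup) :
    (l.foldl (fun d s => d.setdefault (pvKeyOf s) s) d).items = d.items ++ pvFirsts d.keys l := by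
  induction l generalizing d with
  | nil => simp [pvFirsts]
  | cons s r ih =>
    rw [List.foldl_cons]
    by_cases hc : d.contains (pvKeyOf s) = true
    · rw [PySem.Dict.setdefault_of_contains (h := hc), ih d hd]
      rw [pvFirsts, if_pos ((PySem.Dict.contains_iff_mem_keys _ _).mp hc)]
    · have hnc : d.contains (pvKeyOf s) = false := by simpa using hc
      rw [PySem.Dict.setdefault_of_not_contains (h := hnc)]
      rw [ih _ (PySem.Dict.nodup_keys_insert _ _ _ hd)]
      rw [PySem.Dict.items_insert_of_not_contains (h := hnc),
          PySem.Dict.keys_insert_of_not_contains (h := hnc)]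
      rw [pvFirsts, if_neg (fun hm => by simp [(PySem.Dict.contains_iff_mem_keys _ _).mpr hm] at hnc)]
      rw [List.append_assoc, List.cons_append, List.nil_append]
      congr 2
      apply pv_firsts_congr
      intro x; simp [or_comm]

-- the core equivalence: scanning all sentences with guarded inserts equals scanning the
-- first-occurrence key list with unconditional inserts
theorem pv_main (items : List (String × List String)) (hk : (items.map (·.1)).Nodup)
    (l : List (String × String × String)) (seen : List String)
    (m : PySem.Dict String (PySem.Dict Int (List (String × String))))
    (hinv : ∀ tc pi, ((m.getD tc PySem.Dict.empty).contains pi) = true ↔ ∃ k ∈ seen, (k, (tc, pi)) ∈ pvPairs items) :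
    l.foldl (fun m s => (pvFor items (pvKeyOf s)).foldl (fun m tp => pvInsA m tp.1 tp.2 s.1 s.2.1 s.2.2) m) m
    = (pvFirsts seen l).foldl (fun m kv => (pvFor items kv.1).foldl (fun m tp => pvIns m tp.1 tp.2 kv.2) m) m := by
  induction l generalizing seen m with
  | nil => rfl
  | cons s r ih =>
    rw [List.foldl_cons, pvFirsts]
    by_cases hm : pvKeyOf s ∈ seen
    · rw [if_pos hm]
      rw [pv_fold_present _ _ _ _ _ (fun tp htp => (hinv tp.1 tp.2).mpr ⟨pvKeyOf s, hm, by
        simpa using (pvFor_mem items (pvKeyOf s) tp).mp htp⟩)]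
      exact ih seen m hinv
    · rw [if_neg hm, List.foldl_cons]
      have habs : ∀ tp ∈ pvFor items (pvKeyOf s), ((m.getD tp.1 PySem.Dict.empty).contains tp.2) = false := by
        intro tp htp
        by_contra hcc
        have hc : ((m.getD tp.1 PySem.Dict.empty).contains tp.2) = true := by
          cases hb : ((m.getD tp.1 PySem.Dict.empty).contains tp.2) with
          | true => rfl
          | false => exact absurd hb hcc
        obtain ⟨k', hk', hp'⟩ := (hinv tp.1 tp.2).mp hc
        have hp : (pvKeyOf s, tp) ∈ pvPairs items := by
          simpa using (pvFor_mem items (pvKeyOf s) tp).mp htp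
        have : pvKeyOf s = k' := pvPairs_key_unique items hk (by simpa using hp) (by simpa using hp')
        exact hm (this ▸ hk')
      rw [pv_fold_absent _ s _ (pvFor_nodup items hk _) habs]
      refine ih (pvKeyOf s :: seen) _ (fun tc pi => ?_)
      rw [contains_fold_pvIns]
      constructor
      · intro h
        rcases Bool.or_eq_true_iff.mp h with h1 | h2
        · exact ⟨pvKeyOf s, by simp, by simpa using (pvFor_mem items (pvKeyOf s) (tc, pi)).mp (of_decide_eq_true h1)⟩
        · obtain ⟨k', hk', hp'⟩ := (hinv tc pi).mp h2
          exact ⟨k', by simp [hk'], hp'⟩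
      · rintro ⟨k', hk', hp'⟩
        rcases List.mem_cons.mp hk' with h1 | h2
        · refine Bool.or_eq_true_iff.mpr (Or.inl (decide_eq_true ?_))
          exact (pvFor_mem items (pvKeyOf s) (tc, pi)).mpr (h1 ▸ hp')
        · exact Bool.or_eq_true_iff.mpr (Or.inr ((hinv tc pi).mpr ⟨k', h2, hp'⟩))

-- ===== VERDICT (by name: the statement is the Claim_ definition above) =====
theorem match_sentences_to_forms_spec : Claim_equal_match_sentences_to_forms := by
  intro verb_rank conjugation_forms yaml_sentences _
  show match_sentences_to_forms verb_rank conjugation_forms yaml_sentences = match_sentences_to_forms_alt verb_rank conjugation_forms yaml_sentences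
  unfold match_sentences_to_forms match_sentences_to_forms_alt
  cases hs : (PySem.Dict.ofList yaml_sentences).getD verb_rank [] with
  | nil => rfl
  | cons s ss =>
    simp only [List.isEmpty_cons, Bool.false_eq_true, if_false]
    have hk : ((PySem.Dict.ofList conjugation_forms).items.map (·.1)).Nodup :=
      PySem.Dict.nodup_keys_ofList conjugation_forms
    have hlk : ((s :: ss).foldl (fun d s' => d.setdefault (PySem.Str.strip (PySem.Str.lower s'.2.2)) s') PySem.Dict.empty).items
        = pvFirsts [] (s :: ss) := by
      have := pv_sentLookup_items (s :: ss) PySem.Dict.empty (by simp)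
      simpa [pvKeyOf] using this
    rw [hlk]
    refine congrArg (List.map _) (congrArg PySem.Dict.items ?_)
    have hA : (s :: ss).foldl (fun m s' =>
        let key := PySem.Str.strip (PySem.Str.lower s'.2.2)
        if ((PySem.Dict.ofList conjugation_forms).items.foldl (fun d p =>
            (PySem.List.enumerate p.2).foldl (fun d q =>
              if q.2 ≠ "" then d.modify (PySem.Str.lower q.2) [] (· ++ [(p.1, q.1)]) else d) d) PySem.Dict.empty).contains key then
          (((PySem.Dict.ofList conjugation_forms).items.foldl (fun d p =>
            (PySem.List.enumerate p.2).foldl (fun d q =>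
              if q.2 ≠ "" then d.modify (PySem.Str.lower q.2) [] (· ++ [(p.1, q.1)]) else d) d) PySem.Dict.empty).getD key []).foldl (fun m tp => pvInsA m tp.1 tp.2 s'.1 s'.2.1 s'.2.2) m
        else m) PySem.Dict.empty
      = (s :: ss).foldl (fun m s' => (pvFor (PySem.Dict.ofList conjugation_forms).items (pvKeyOf s')).foldl (fun m tp => pvInsA m tp.1 tp.2 s'.1 s'.2.1 s'.2.2) m) PySem.Dict.empty := by
      refine pv_foldl_congr _ _ (fun m s' => ?_)
      exact pvA_step _ _ _ _ _ _
    rw [hA]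
    have hB : (pvFirsts [] (s :: ss)).foldl (fun m kv =>
        ((PySem.Dict.ofList conjugation_forms).items).foldl (fun m p =>
          (PySem.List.enumerate p.2).foldl (fun m q =>
            if q.2 ≠ "" ∧ PySem.Str.lower q.2 = kv.1 then
              let m' := m.setdefault p.1 PySem.Dict.empty
              m'.insert p.1 ((m'.getD p.1 PySem.Dict.empty).insert q.1
                [("fr", kv.2.1), ("de", kv.2.2.1), ("blank", kv.2.2.2)])
            else m) m) m) PySem.Dict.empty
      = (pvFirsts [] (s :: ss)).foldl (fun m kv => (pvFor (PySem.Dict.ofList conjugation_forms).items kv.1).foldl (fun m tp => pvIns m tp.1 tp.2 kv.2) m) PySem.Dict.empty := by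
      refine pv_foldl_congr _ _ (fun m kv => ?_)
      exact pvB_step _ _ _ _
    rw [hB]
    exact pv_main _ hk (s :: ss) [] PySem.Dict.empty (by simp)
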